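-- pv_equiv track=rewrite | github.com/YixingLuo/HSA | Codes/Conservative_Comparison.py | get_comparison_under_scenario
-- ===== SOURCE A (Python) =====
-- def get_comparison_under_scenario (violation_severity_A, violation_severity_B):
--     comparison_severity = []
--     ## compare the violation severity of each requirement for configuration A and configuration B
--     for i in range(len(violation_severity_A)):
--         if violation_severity_A[i] > violation_severity_B[i]:
--             comparison_severity.append(1)
--         elif violation_severity_A[i] < violation_severity_B[i]:
--             comparison_severity.append(2)
--         else:
--             comparison_severity.append(0)
--
--     if comparison_severity.count(0) == len(violation_severity_A): ## Configuration_A ties with Configuration_B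
--         return 0
--     elif comparison_severity.count(2) == 0: ## Configuration_B is safer
--         return 1
--     elif comparison_severity.count(1) == 0: ## Configuration_A is safer
--         return 2
--     else: ## Configuration_A and Configuration_B cannot be compared under this test scenario
--         return -1
-- ===== SOURCE B (Python) =====
-- def get_comparison_under_scenario(violation_severity_A, violation_severity_B):
--     has_greater = False
--     has_less = False
--     for i in range(len(violation_severity_A)):
--         has_greater = has_greater or violation_severity_A[i] > violation_severity_B[i]
--         has_less = has_less or violation_severity_A[i] < violation_severity_B[i]
--     if not has_greater and not has_less:
--         return 0
--     elif not has_less: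
--         return 1
--     elif not has_greater:
--         return 2
--     else:
--         return -1
-- ===== Notes on version B (the rewrite author's own statement) =====
-- stated objective: simpler
-- what changed: Replaces the materialised per-index comparison list and three count() passes with a single loop maintaining two boolean flags (saw A>B, saw A<B) and a direct four-way classification from the flags.
import Mathlib
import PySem

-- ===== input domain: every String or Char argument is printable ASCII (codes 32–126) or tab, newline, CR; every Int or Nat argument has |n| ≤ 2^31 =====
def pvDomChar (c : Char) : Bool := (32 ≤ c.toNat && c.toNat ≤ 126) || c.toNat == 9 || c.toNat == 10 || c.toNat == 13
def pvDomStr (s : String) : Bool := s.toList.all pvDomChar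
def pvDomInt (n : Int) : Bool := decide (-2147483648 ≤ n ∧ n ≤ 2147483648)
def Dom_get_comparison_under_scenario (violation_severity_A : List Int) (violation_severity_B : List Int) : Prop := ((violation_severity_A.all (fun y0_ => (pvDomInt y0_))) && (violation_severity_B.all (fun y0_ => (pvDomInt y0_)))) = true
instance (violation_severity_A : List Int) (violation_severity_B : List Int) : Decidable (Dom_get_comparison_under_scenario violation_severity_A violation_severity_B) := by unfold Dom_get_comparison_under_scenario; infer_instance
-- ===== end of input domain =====

-- B replaces A's materialised comparison list and three count() passes by one loop over
-- the same indices keeping two boolean flags; objective: simpler (O(1) extra space).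
-- Pre_ excludes inputs where B is shorter than A, on which Python A raises IndexError.

-- ===== PORT A =====
def get_comparison_under_scenario (violation_severity_A : List Int) (violation_severity_B : List Int) : Int :=
  let comparison_severity :=
    (PySem.List.pyRange 0 (violation_severity_A.length : Int) 1).foldl
      (fun acc i =>
        if PySem.List.pyGetD violation_severity_A i 0 > PySem.List.pyGetD violation_severity_B i 0 then
          acc ++ [(1 : Int)]
        else if PySem.List.pyGetD violation_severity_A i 0 < PySem.List.pyGetD violation_severity_B i 0 then
          acc ++ [(2 : Int)]
        else
          acc ++ [(0 : Int)]) []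
  if PySem.List.count comparison_severity 0 = violation_severity_A.length then 0
  else if PySem.List.count comparison_severity 2 = 0 then 1
  else if PySem.List.count comparison_severity 1 = 0 then 2
  else -1

-- ===== PORT B =====
def get_comparison_under_scenario_alt (violation_severity_A : List Int) (violation_severity_B : List Int) : Int :=
  let flags :=
    (PySem.List.pyRange 0 (violation_severity_A.length : Int) 1).foldl
      (fun (p : Bool × Bool) i =>
        (p.1 || decide (PySem.List.pyGetD violation_severity_A i 0 > PySem.List.pyGetD violation_severity_B i 0),
         p.2 || decide (PySem.List.pyGetD violation_severity_A i 0 < PySem.List.pyGetD violation_severity_B i 0)))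
      (false, false)
  if !flags.1 && !flags.2 then 0
  else if !flags.2 then 1
  else if !flags.1 then 2
  else -1

-- ===== PRECONDITION & SPEC =====
-- Pre_ excludes inputs where B is shorter than A: Python A raises IndexError there.
def Pre_get_comparison_under_scenario (violation_severity_A : List Int) (violation_severity_B : List Int) : Prop :=
  violation_severity_A.length ≤ violation_severity_B.length
instance (violation_severity_A : List Int) (violation_severity_B : List Int) : Decidable (Pre_get_comparison_under_scenario violation_severity_A violation_severity_B) := by unfold Pre_get_comparison_under_scenario; infer_instance
def pvWitness_get_comparison_under_scenario : List Int × List Int := ([1, 2, 0], [0, 2, 3])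
def Spec_get_comparison_under_scenario (violation_severity_A : List Int) (violation_severity_B : List Int) (out : Int) : Prop := out = get_comparison_under_scenario_alt violation_severity_A violation_severity_B
instance (violation_severity_A : List Int) (violation_severity_B : List Int) (out : Int) : Decidable (Spec_get_comparison_under_scenario violation_severity_A violation_severity_B out) := by unfold Spec_get_comparison_under_scenario; infer_instance

-- ===== CLAIM =====
def Claim_equal_get_comparison_under_scenario : Prop := ∀ (violation_severity_A : List Int) (violation_severity_B : List Int), Dom_get_comparison_under_scenario violation_severity_A violation_severity_B → Pre_get_comparison_under_scenario violation_severity_A violation_severity_B → Spec_get_comparison_under_scenario violation_severity_A violation_severity_B (get_comparison_under_scenario violation_severity_A violation_severity_B)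

-- ===== LEMMAS AND PROOFS =====

theorem foldl_or_any {α : Type} (p : α → Bool) (l : List α) (b : Bool) :
    l.foldl (fun acc x => acc || p x) b = (b || l.any p) := by
  induction l generalizing b with
  | nil => simp
  | cons x xs ih => simp [List.foldl_cons, ih, Bool.or_assoc]

theorem main_eq (A B : List Int) :
    get_comparison_under_scenario A B = get_comparison_under_scenario_alt A B := by
  unfold get_comparison_under_scenario get_comparison_under_scenario_alt
  set l := PySem.List.pyRange 0 (A.length : Int) 1 with hl
  set f : Int → Int := fun i =>
    if PySem.List.pyGetD A i 0 > PySem.List.pyGetD B i 0 then 1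
    else if PySem.List.pyGetD A i 0 < PySem.List.pyGetD B i 0 then 2
    else 0 with hf
  have hf1 : ∀ i : Int, (f i = 1) ↔ PySem.List.pyGetD A i 0 > PySem.List.pyGetD B i 0 := by
    intro i; simp only [hf]; split_ifs <;> constructor <;> intro h <;> omega
  have hf2 : ∀ i : Int, (f i = 2) ↔ PySem.List.pyGetD A i 0 < PySem.List.pyGetD B i 0 := by
    intro i; simp only [hf]; split_ifs <;> constructor <;> intro h <;> omega
  have hf0 : ∀ i : Int, (f i = 0) ↔
      (¬ PySem.List.pyGetD A i 0 > PySem.List.pyGetD B i 0 ∧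
       ¬ PySem.List.pyGetD A i 0 < PySem.List.pyGetD B i 0) := by
    intro i; simp only [hf]; split_ifs <;> constructor <;> intro h <;> omega
  have hfold : l.foldl (fun acc i =>
      if PySem.List.pyGetD A i 0 > PySem.List.pyGetD B i 0 then acc ++ [(1 : Int)]
      else if PySem.List.pyGetD A i 0 < PySem.List.pyGetD B i 0 then acc ++ [(2 : Int)]
      else acc ++ [(0 : Int)]) [] = l.map f := by
    have := PySem.List.foldl_append_singleton_eq_map (f := f) (l := l) (acc := ([] : List Int))
    rw [List.nil_append] at this
    rw [← this]
    apply PySem.List.foldl_congr_mem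
    intro acc i _
    simp only [hf]
    split_ifs <;> rfl
  have hflags : l.foldl (fun (p : Bool × Bool) i =>
      (p.1 || decide (PySem.List.pyGetD A i 0 > PySem.List.pyGetD B i 0),
       p.2 || decide (PySem.List.pyGetD A i 0 < PySem.List.pyGetD B i 0))) (false, false)
      = (l.any (fun i => decide (PySem.List.pyGetD A i 0 > PySem.List.pyGetD B i 0)),
         l.any (fun i => decide (PySem.List.pyGetD A i 0 < PySem.List.pyGetD B i 0))) := by
    rw [PySem.List.foldl_prod_mk
      (f := fun acc i => acc || decide (PySem.List.pyGetD A i 0 > PySem.List.pyGetD B i 0))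
      (g := fun acc i => acc || decide (PySem.List.pyGetD A i 0 < PySem.List.pyGetD B i 0))]
    rw [foldl_or_any, foldl_or_any]
    simp
  simp only [hfold, hflags]
  set ga := l.any (fun i => decide (PySem.List.pyGetD A i 0 > PySem.List.pyGetD B i 0)) with hga
  set lb := l.any (fun i => decide (PySem.List.pyGetD A i 0 < PySem.List.pyGetD B i 0)) with hlb
  have hlen : l.length = A.length := by
    rw [hl, PySem.List.length_pyRange_one]; simp
  have h1 : (PySem.List.count (l.map f) 1 = 0) ↔ ga = false := by
    rw [PySem.List.count_eq, List.count_eq_zero, hga, List.any_eq_false]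
    simp only [decide_eq_true_eq]
    constructor
    · intro hnot i hi hgt
      exact hnot (List.mem_map.mpr ⟨i, hi, (hf1 i).mpr hgt⟩)
    · intro h hmem
      obtain ⟨i, hi, hfi⟩ := List.mem_map.mp hmem
      exact h i hi ((hf1 i).mp hfi)
  have h2 : (PySem.List.count (l.map f) 2 = 0) ↔ lb = false := by
    rw [PySem.List.count_eq, List.count_eq_zero, hlb, List.any_eq_false]
    simp only [decide_eq_true_eq]
    constructor
    · intro hnot i hi hlt
      exact hnot (List.mem_map.mpr ⟨i, hi, (hf2 i).mpr hlt⟩)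
    · intro h hmem
      obtain ⟨i, hi, hfi⟩ := List.mem_map.mp hmem
      exact h i hi ((hf2 i).mp hfi)
  have hml : (l.map f).length = l.length := List.length_map ..
  have h0 : (PySem.List.count (l.map f) 0 = A.length) ↔ (ga = false ∧ lb = false) := by
    rw [PySem.List.count_eq, ← hlen, ← hml, List.count_eq_length, hga, hlb,
      List.any_eq_false, List.any_eq_false]
    simp only [decide_eq_true_eq]
    constructor
    · intro h
      constructor <;> intro i hi
      · exact fun hgt =>
          ((hf0 i).mp (h (f i) (List.mem_map.mpr ⟨i, hi, rfl⟩)).symm).1 hgt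
      · exact fun hlt =>
          ((hf0 i).mp (h (f i) (List.mem_map.mpr ⟨i, hi, rfl⟩)).symm).2 hlt
    · rintro ⟨hg, hl2⟩ b hb
      obtain ⟨i, hi, rfl⟩ := List.mem_map.mp hb
      exact ((hf0 i).mpr ⟨hg i hi, hl2 i hi⟩).symm
  simp only [h0, h1, h2]
  clear_value ga lb
  cases ga <;> cases lb <;> simp

-- ===== VERDICT =====
theorem get_comparison_under_scenario_spec : Claim_equal_get_comparison_under_scenario := by
  intro A B _ _
  unfold Spec_get_comparison_under_scenario
  exact main_eq A B
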